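-- pv_equiv track=rewrite | github.com/bbwieland/Advent2024 | day3.py | get_mul_substring
-- ===== SOURCE A (Python) =====
-- def get_mul_substring(mul_string: str, do: list, dont: list) -> str:
--
--     substring = ""
--     program_on = True
--     for index, value in enumerate(mul_string):
--
--         if index in do:
--             program_on = True
--
--         if index in dont:
--             program_on = False
--
--         if program_on:
--             substring = substring + value
--
--     return substring
-- ===== SOURCE B (Python) =====
-- def get_mul_substring(mul_string: str, do: list, dont: list) -> str:
--     n = len(mul_string)
--     toggles = sorted({p for p in do + dont if 0 <= p < n})
--     parts = []
--     state = True
--     prev = 0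
--     for pos in toggles:
--         if state:
--             parts.append(mul_string[prev:pos])
--         state = pos not in dont
--         prev = pos
--     if state:
--         parts.append(mul_string[prev:])
--     return "".join(parts)
-- ===== Notes on version B (the rewrite author's own statement) =====
-- stated objective: faster
-- what changed: Instead of testing every character index for membership in do/dont, B builds the sorted set of in-range toggle positions once and emits whole enabled slices between consecutive toggles.
import Mathlib
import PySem

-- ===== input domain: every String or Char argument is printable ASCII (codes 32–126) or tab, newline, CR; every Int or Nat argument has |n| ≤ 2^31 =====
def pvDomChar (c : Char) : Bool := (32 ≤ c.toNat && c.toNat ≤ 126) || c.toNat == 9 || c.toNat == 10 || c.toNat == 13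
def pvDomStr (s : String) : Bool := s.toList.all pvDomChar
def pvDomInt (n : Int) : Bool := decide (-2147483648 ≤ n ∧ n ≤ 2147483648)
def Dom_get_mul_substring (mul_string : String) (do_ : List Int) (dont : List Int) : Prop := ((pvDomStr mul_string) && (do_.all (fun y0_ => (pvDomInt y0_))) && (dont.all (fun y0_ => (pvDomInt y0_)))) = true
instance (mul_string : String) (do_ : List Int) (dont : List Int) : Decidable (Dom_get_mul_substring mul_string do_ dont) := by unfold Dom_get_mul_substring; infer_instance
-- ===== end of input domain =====

-- B replaces A's per-character membership scans by a sorted table of in-range toggle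
-- positions walked once, emitting whole enabled slices (objective: faster).

-- ===== PORT A =====
-- A: scan enumerate(mul_string), flipping program_on by membership tests per index,
-- appending each enabled character.  (String built as List Char, wrapped at the end.)
def get_mul_substring (mul_string : String) (do_ : List Int) (dont : List Int) : String :=
  let r := (PySem.List.enumerate mul_string.toList 0).foldl
    (fun (st : List Char × Bool) p =>
      let program_on := if p.1 ∈ do_ then true else st.2
      let program_on := if p.1 ∈ dont then false else program_on
      (if program_on then st.1 ++ [p.2] else st.1, program_on))
    ([], true)
  String.ofList r.1

-- ===== PORT B =====
-- B: sorted set of in-range toggle positions, then one segment-wise walk.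
def get_mul_substring_alt (mul_string : String) (do_ : List Int) (dont : List Int) : String :=
  let cs := mul_string.toList
  let n : Int := cs.length
  let toggles := PySem.List.sorted
    (PySem.Set.ofList ((do_ ++ dont).filter (fun p => decide (0 ≤ p) && decide (p < n))))
    (fun x => x) false
  let st := toggles.foldl
    (fun (st : List (List Char) × Bool × Int) pos =>
      let parts := if st.2.1 then st.1 ++ [PySem.List.slice cs (some st.2.2) (some pos)] else st.1
      (parts, !(decide (pos ∈ dont)), pos))
    ([], true, 0)
  let parts := if st.2.1 then st.1 ++ [PySem.List.slice cs (some st.2.2) none] else st.1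
  String.ofList parts.flatten

-- ===== PRECONDITION & SPEC =====
def Spec_get_mul_substring (mul_string : String) (do_ : List Int) (dont : List Int) (out : String) : Prop := out = get_mul_substring_alt mul_string do_ dont
instance (mul_string : String) (do_ : List Int) (dont : List Int) (out : String) : Decidable (Spec_get_mul_substring mul_string do_ dont out) := by unfold Spec_get_mul_substring; infer_instance

-- ===== CLAIM (what is proved, stated in full; the proofs are below) =====
def Claim_equal_get_mul_substring : Prop := ∀ (mul_string : String) (do_ : List Int) (dont : List Int), Dom_get_mul_substring mul_string do_ dont → Spec_get_mul_substring mul_string do_ dont (get_mul_substring mul_string do_ dont)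

-- ===== LEMMAS AND PROOFS =====

-- the effect of one index on the on/off state, in A's branch order
def pvTog (do_ dont : List Int) (i : Int) (b : Bool) : Bool :=
  if i ∈ dont then false else if i ∈ do_ then true else b

-- reference run: process characters from index i with current state b
def pvRun (do_ dont : List Int) (i : Int) (b : Bool) : List Char → List Char
  | [] => []
  | c :: rest =>
      let b' := pvTog do_ dont i b
      (if b' then [c] else []) ++ pvRun do_ dont (i + 1) b' rest

lemma pvRun_fix (do_ dont : List Int) (xs : List Char) :
    ∀ (i : Int) (b : Bool),
    (∀ j : Int, i ≤ j → j < i + xs.length → pvTog do_ dont j b = b) →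
    pvRun do_ dont i b xs = if b then xs else [] := by
  induction xs with
  | nil => intro i b _; cases b <;> rfl
  | cons c rest ih =>
      intro i b h
      have hb : pvTog do_ dont i b = b := h i le_rfl (by simp only [List.length_cons]; omega)
      show (if pvTog do_ dont i b then [c] else []) ++ pvRun do_ dont (i+1) (pvTog do_ dont i b) rest = _
      rw [hb, ih (i+1) b (fun j h1 h2 => h j (by omega) (by simp only [List.length_cons] at h2 ⊢; omega))]
      cases b <;> simp

lemma pvRun_append (do_ dont : List Int) (xs : List Char) :
    ∀ (ys : List Char) (i : Int) (b : Bool),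
    (∀ j : Int, i ≤ j → j < i + xs.length → pvTog do_ dont j b = b) →
    pvRun do_ dont i b (xs ++ ys)
      = (if b then xs else []) ++ pvRun do_ dont (i + xs.length) b ys := by
  induction xs with
  | nil => intro ys i b _; simp
  | cons c rest ih =>
      intro ys i b h
      have hb : pvTog do_ dont i b = b := h i le_rfl (by simp only [List.length_cons]; omega)
      show (if pvTog do_ dont i b then [c] else []) ++
        pvRun do_ dont (i+1) (pvTog do_ dont i b) (rest ++ ys) = _
      rw [hb, ih ys (i+1) b (fun j h1 h2 => h j (by omega) (by simp only [List.length_cons] at h2 ⊢; omega))]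
      have : i + 1 + (rest.length : Int) = i + ((c :: rest).length : Int) := by simp; omega
      rw [this]
      cases b <;> simp

-- A's fold equals the reference run
lemma pvFoldA (do_ dont : List Int) (cs : List Char) :
    ∀ (i : Int) (acc : List Char) (b : Bool),
    ((PySem.List.enumerate cs i).foldl
      (fun (st : List Char × Bool) p =>
        let program_on := if p.1 ∈ do_ then true else st.2
        let program_on := if p.1 ∈ dont then false else program_on
        (if program_on then st.1 ++ [p.2] else st.1, program_on))
      (acc, b)).1 = acc ++ pvRun do_ dont i b cs := by
  induction cs with
  | nil => intro i acc b; simp [PySem.List.enumerate_nil, pvRun]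
  | cons c rest ih =>
      intro i acc b
      rw [PySem.List.enumerate_cons, List.foldl_cons]
      have hstep :
        ((let program_on := if (i, c).1 ∈ do_ then true else ((acc, b) : List Char × Bool).2;
          let program_on := if (i, c).1 ∈ dont then false else program_on;
          ((if program_on then ((acc, b) : List Char × Bool).1 ++ [(i, c).2] else (acc, b).1, program_on) : List Char × Bool)))
          = (if pvTog do_ dont i b then acc ++ [c] else acc, pvTog do_ dont i b) := by
        simp only [pvTog]
        by_cases hd : i ∈ dont <;> by_cases ho : i ∈ do_ <;> simp [hd, ho]
      rw [hstep, ih (i+1)]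
      cases htog : pvTog do_ dont i b <;> simp [pvRun, htog]

-- B's segment walk equals the reference run
lemma pvWalk (do_ dont : List Int) (cs : List Char) (ps : List Int) :
    ∀ (parts : List (List Char)) (b : Bool) (prev lo : Int),
    ps.Pairwise (· < ·) →
    (∀ x : Int, x ∈ ps ↔ (lo ≤ x ∧ x < cs.length ∧ (x ∈ do_ ∨ x ∈ dont))) →
    0 ≤ prev → prev ≤ lo →
    (∀ j : Int, prev ≤ j → j < lo → pvTog do_ dont j b = b) →
    (let st := ps.foldl
        (fun (st : List (List Char) × Bool × Int) pos =>
          let parts := if st.2.1 then st.1 ++ [PySem.List.slice cs (some st.2.2) (some pos)] else st.1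
          (parts, !(decide (pos ∈ dont)), pos))
        (parts, b, prev)
     (if st.2.1 then st.1 ++ [PySem.List.slice cs (some st.2.2) none] else st.1).flatten)
    = parts.flatten ++ pvRun do_ dont prev b (cs.drop prev.toNat) := by
  induction ps with
  | nil =>
      intro parts b prev lo _ hmem h0 h1 hfix
      simp only [List.foldl_nil]
      have hrun : pvRun do_ dont prev b (cs.drop prev.toNat) = if b then cs.drop prev.toNat else [] := by
        apply pvRun_fix
        intro j hj1 hj2
        by_cases hlo : j < lo
        · exact hfix j hj1 hlo
        · have hjn : j < (cs.length : Int) := by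
            have : (cs.drop prev.toNat).length = cs.length - prev.toNat := by simp
            omega
          have : ¬ (j ∈ do_ ∨ j ∈ dont) := by
            intro hc
            have := (hmem j).2 ⟨by omega, hjn, hc⟩
            simp at this
          push_neg at this
          simp [pvTog, this.1, this.2]
      rw [hrun, PySem.List.slice_from cs h0]
      cases b <;> simp
  | cons p ps ih =>
      intro parts b prev lo hps hmem h0 h1 hfix
      have hp := (hmem p).1 (by simp)
      obtain ⟨hlop, hpn, hptog⟩ := hp
      have hprevp : prev ≤ p := le_trans h1 hlop
      have h0p : (0:Int) ≤ p := le_trans h0 hprevp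
      have hpslt : ∀ x ∈ ps, p < x := by
        intro x hx; exact (List.pairwise_cons.1 hps).1 x hx
      -- state after the head step
      set b' : Bool := !(decide (p ∈ dont)) with hb'
      have htogb' : ∀ c : Bool, pvTog do_ dont p c = b' := by
        intro c
        unfold pvTog
        by_cases hd : p ∈ dont
        · simp [hd, hb']
        · rcases hptog with hdo | hdn
          · simp [hd, hdo, hb']
          · exact absurd hdn hd
      simp only [List.foldl_cons]
      have hmem' : ∀ x : Int, x ∈ ps ↔ (p + 1 ≤ x ∧ x < cs.length ∧ (x ∈ do_ ∨ x ∈ dont)) := by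
        intro x
        constructor
        · intro hx
          have h1x := (hmem x).1 (by simp [hx])
          exact ⟨by have := hpslt x hx; omega, h1x.2.1, h1x.2.2⟩
        · rintro ⟨hx1, hx2, hx3⟩
          have : x ∈ p :: ps := (hmem x).2 ⟨by omega, hx2, hx3⟩
          rcases List.mem_cons.1 this with rfl | h
          · omega
          · exact h
      have hfix' : ∀ j : Int, p ≤ j → j < p + 1 → pvTog do_ dont j b' = b' := by
        intro j hj1 hj2
        have : j = p := by omega
        subst this
        exact htogb' b'
      have hih := ih (if b then parts ++ [PySem.List.slice cs (some prev) (some p)] else parts)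
        b' p (p + 1) (List.pairwise_cons.1 hps).2 hmem' h0p (by omega) hfix'
      simp only at hih ⊢
      rw [hih]
      -- now compute the RHS
      set mid := (cs.drop prev.toNat).take (p.toNat - prev.toNat) with hmid
      have hmidlen : (mid.length : Int) = p - prev := by
        simp [hmid]
        omega
      have hsplit : cs.drop prev.toNat = mid ++ cs.drop p.toNat := by
        rw [hmid]
        have : cs.drop p.toNat = (cs.drop prev.toNat).drop (p.toNat - prev.toNat) := by
          rw [List.drop_drop]
          congr 1
          omega
        rw [this, List.take_append_drop]
      have hnotog : ∀ j : Int, prev ≤ j → j < prev + (mid.length : Int) → pvTog do_ dont j b = b := by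
        intro j hj1 hj2
        rw [hmidlen] at hj2
        by_cases hlo : j < lo
        · exact hfix j hj1 hlo
        · have : ¬ (j ∈ do_ ∨ j ∈ dont) := by
            intro hc
            have hjm : j ∈ p :: ps := (hmem j).2 ⟨by omega, by omega, hc⟩
            rcases List.mem_cons.1 hjm with rfl | h
            · omega
            · have := hpslt j h; omega
          push_neg at this
          simp [pvTog, this.1, this.2]
      have hrunsplit : pvRun do_ dont prev b (cs.drop prev.toNat)
          = (if b then mid else []) ++ pvRun do_ dont p b (cs.drop p.toNat) := by
        rw [hsplit, pvRun_append do_ dont mid (cs.drop p.toNat) prev b hnotog]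
        have hpp : prev + (mid.length : Int) = p := by omega
        rw [hpp]
      have hdropp : cs.drop p.toNat = cs[p.toNat] :: cs.drop (p.toNat + 1) :=
        List.drop_eq_getElem_cons (by omega)
      have hchg : pvRun do_ dont p b (cs.drop p.toNat) = pvRun do_ dont p b' (cs.drop p.toNat) := by
        rw [hdropp]
        show (if pvTog do_ dont p b then _ else []) ++ pvRun do_ dont (p+1) (pvTog do_ dont p b) _
           = (if pvTog do_ dont p b' then _ else []) ++ pvRun do_ dont (p+1) (pvTog do_ dont p b') _
        rw [htogb' b, htogb' b']
      rw [hrunsplit, hchg]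
      have hslice : PySem.List.slice cs (some prev) (some p) = mid := by
        rw [PySem.List.slice_toNat cs h0 h0p, hmid]
      rw [hslice]
      cases b <;> simp
-- ===== VERDICT (by name: the statement is the Claim_ definition above) =====
theorem get_mul_substring_spec : Claim_equal_get_mul_substring := by
  intro mul_string do_ dont _
  unfold Spec_get_mul_substring get_mul_substring get_mul_substring_alt
  simp only
  set cs := mul_string.toList with hcs
  set toggles := PySem.List.sorted
    (PySem.Set.ofList ((do_ ++ dont).filter (fun p => decide (0 ≤ p) && decide (p < (cs.length : Int)))))
    (fun x => x) false with htg
  have hps : toggles.Pairwise (· < ·) := PySem.List.sorted_ofList_pairwise_lt _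
  have hmem : ∀ x : Int, x ∈ toggles ↔ (0 ≤ x ∧ x < (cs.length : Int) ∧ (x ∈ do_ ∨ x ∈ dont)) := by
    intro x
    rw [htg, PySem.List.mem_sorted, PySem.Set.mem_ofList, List.mem_filter]
    simp
    tauto
  have hw := pvWalk do_ dont cs toggles [] true 0 0 hps
    (by intro x; rw [hmem x]) le_rfl le_rfl (by intro j h1 h2; omega)
  simp only at hw
  rw [pvFoldA do_ dont cs 0 [] true]
  rw [hw]
  simp
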